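-- pv_equiv track=rewrite | github.com/rpa1tera/deepcyclone | pre processamento/anota_recorta.py | categorize_wind_speed
-- ===== SOURCE A (Python) =====
-- def categorize_wind_speed(speed):
--
--     categories = [
--         (137, 'H5'), (113, 'H4'), (96, 'H3'),
--         (83, 'H2'), (64, 'H1'), (34, 'TS')
--     ]
--     for limiar, categoria in categories:
--         if speed >= limiar:
--             return categoria
--     return 'TD'
-- ===== SOURCE B (Python) =====
-- import bisect
--
-- _THRESHOLDS = [34, 64, 83, 96, 113, 137]
-- _LABELS = ['TD', 'TS', 'H1', 'H2', 'H3', 'H4', 'H5']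
--
-- def categorize_wind_speed(speed):
--     return _LABELS[bisect.bisect_right(_THRESHOLDS, speed)]
-- ===== Notes on version B (the rewrite author's own statement) =====
-- stated objective: idiomatic
-- what changed: Replaces the descending linear scan with if-chain by a sorted threshold table and bisect_right lookup into a parallel label list.
import Mathlib
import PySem

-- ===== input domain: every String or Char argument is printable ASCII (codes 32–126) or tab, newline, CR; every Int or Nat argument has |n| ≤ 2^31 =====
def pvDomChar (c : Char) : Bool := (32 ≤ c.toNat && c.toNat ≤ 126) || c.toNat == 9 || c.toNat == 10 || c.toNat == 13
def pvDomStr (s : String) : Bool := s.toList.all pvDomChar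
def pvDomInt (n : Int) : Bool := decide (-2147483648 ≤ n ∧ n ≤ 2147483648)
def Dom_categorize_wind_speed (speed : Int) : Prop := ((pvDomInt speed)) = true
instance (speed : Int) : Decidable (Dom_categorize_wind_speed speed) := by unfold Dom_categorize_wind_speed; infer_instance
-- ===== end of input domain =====

-- ===== PORT A =====
-- Header: B replaces A's descending if-chain scan by a bisect_right lookup into a sorted threshold table (idiomatic).
-- loop over the descending (threshold, label) list, returning at the first 'speed >= limiar'
def pvScanA (speed : Int) : List (Int × String) → String
  | [] => "TD"
  | (limiar, categoria) :: rest =>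
      if speed ≥ limiar then categoria else pvScanA speed rest

def categorize_wind_speed (speed : Int) : String :=
  pvScanA speed [(137, "H5"), (113, "H4"), (96, "H3"), (83, "H2"), (64, "H1"), (34, "TS")]

-- ===== PORT B =====
-- bisect.bisect_right on a sorted list = number of elements ≤ speed; labels[idx]
def categorize_wind_speed_alt (speed : Int) : String :=
  let thresholds : List Int := [34, 64, 83, 96, 113, 137]
  let labels : List String := ["TD", "TS", "H1", "H2", "H3", "H4", "H5"]
  labels.getD (thresholds.countP (fun t => t ≤ speed)) "TD" 

-- ===== PRECONDITION & SPEC =====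
def Spec_categorize_wind_speed (speed : Int) (out : String) : Prop := out = categorize_wind_speed_alt speed
instance (speed : Int) (out : String) : Decidable (Spec_categorize_wind_speed speed out) := by unfold Spec_categorize_wind_speed; infer_instance

-- ===== CLAIM (what is proved, stated in full; the proofs are below) =====
def Claim_equal_categorize_wind_speed : Prop := ∀ (speed : Int), Dom_categorize_wind_speed speed → Spec_categorize_wind_speed speed (categorize_wind_speed speed)

-- ===== LEMMAS AND PROOFS =====

-- ===== VERDICT (by name: the statement is the Claim_ definition above) =====
theorem categorize_wind_speed_spec : Claim_equal_categorize_wind_speed := by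
  intro speed _
  unfold Spec_categorize_wind_speed
  simp only [categorize_wind_speed, categorize_wind_speed_alt, pvScanA,
    List.countP, List.countP.go, Bool.cond_decide]
  split_ifs <;> simp_all <;> omega
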